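-- pv_equiv track=rewrite | github.com/SestrenExsis/CodeKatas | withgoogle/GoogleCodeJam2021.py | solve
-- ===== SOURCE A (Python) =====
-- def solve(nums):
--     modded_nums = nums[::]
--     for i in range(1, len(modded_nums)):
--         str_num = str(nums[i])
--         start = max(nums[i], modded_nums[i - 1])
--         offset = 0
--         while True:
--             if start + offset > modded_nums[i - 1] and str(start + offset).startswith(str_num):
--                 break
--             offset += 1
--         modded_nums[i] = start + offset
--     result = sum(len(str(modded_nums[i])) - len(str(nums[i])) for i in range(len(nums)))
--     return result
-- ===== SOURCE B (Python) =====
-- def solve(nums):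
--     # Arithmetic: the numbers > prev whose decimal string starts with str(num)
--     # (num >= 1) with k appended digits are [num*10**k, (num+1)*10**k - 1];
--     # pick the least k (and least member) instead of scanning one by one.
--     total = 0
--     prev = None
--     for num in nums:
--         if prev is None or num > prev:
--             prev = num
--         else:
--             k = 1
--             while (num + 1) * 10 ** k - 1 <= prev:
--                 k += 1
--             prev = max(num * 10 ** k, prev + 1)
--             total += k
--     return total
-- ===== Notes on version B (the rewrite author's own statement) =====
-- stated objective: faster
-- what changed: Instead of probing every integer above the previous value until one's decimal string has str(num) as a prefix, B picks the number k of appended digits arithmetically (smallest k with (num+1)*10^k-1 > prev) and takes max(num*10^k, prev+1) directly, so no value-by-value scan and no string operations at all.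
import Mathlib
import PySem

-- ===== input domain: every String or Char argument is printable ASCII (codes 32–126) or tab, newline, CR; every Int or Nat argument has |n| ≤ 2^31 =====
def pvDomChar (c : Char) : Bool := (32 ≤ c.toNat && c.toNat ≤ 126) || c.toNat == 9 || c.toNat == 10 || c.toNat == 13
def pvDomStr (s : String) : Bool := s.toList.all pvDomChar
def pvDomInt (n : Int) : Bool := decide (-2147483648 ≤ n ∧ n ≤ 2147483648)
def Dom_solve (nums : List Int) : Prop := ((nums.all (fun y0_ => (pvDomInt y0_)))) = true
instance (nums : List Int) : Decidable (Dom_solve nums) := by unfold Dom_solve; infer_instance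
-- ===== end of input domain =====

-- B computes each step's appended-digit count k arithmetically instead of A's value-by-value scan for the next number whose decimal string extends str(nums[i]).
-- ===== PORT A =====
-- A's inner `while True:` search, one probe per candidate value; `fuel` only makes
-- the recursion total (A diverges outside Pre_solve; under Pre_solve the fuel is never exhausted).
def findOffset (prev : Int) (strNum : String) (start : Int) : Nat → Int → Int
  | 0, offset => offset
  | fuel + 1, offset =>
    if start + offset > prev ∧ PySem.Str.startswith (PySem.Int.toStr (start + offset)) strNum then
      offset
    else
      findOffset prev strNum start fuel (offset + 1)

def solve (nums : List Int) : Int :=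
  let modded0 := PySem.List.slice nums none none
  let modded := (PySem.List.pyRange 1 (nums.length : Int)).foldl (fun md i =>
      let strNum := PySem.Int.toStr (PySem.List.pyGetD nums i 0)
      let start := max (PySem.List.pyGetD nums i 0) (PySem.List.pyGetD md (i - 1) 0)
      let offset := findOffset (PySem.List.pyGetD md (i - 1) 0) strNum start
        (10 * start.natAbs + 11) 0
      md.set i.toNat (start + offset)) modded0
  ((PySem.List.pyRange 0 (nums.length : Int)).map (fun i =>
      (PySem.Str.len (PySem.Int.toStr (PySem.List.pyGetD modded i 0)))
        - (PySem.Str.len (PySem.Int.toStr (PySem.List.pyGetD nums i 0))))).sum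

-- ===== PORT B =====
-- B's `while (num + 1) * 10 ** k - 1 <= prev: k += 1`; fuel only for totality
-- (under Pre_solve this loop is entered with 1 ≤ num and the fuel is never exhausted).
def findK (num prev : Int) : Nat → Nat → Nat
  | k, 0 => k
  | k, fuel + 1 =>
    if (num + 1) * 10 ^ k - 1 ≤ prev then findK num prev (k + 1) fuel else k

def solve_alt (nums : List Int) : Int :=
  (nums.foldl (fun (st : Option Int × Int) num =>
    match st.1 with
    | none => (some num, st.2)
    | some prev =>
      if num > prev then (some num, st.2)
      else
        let k := findK num prev 1 (prev.natAbs + 2)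
        (some (max (num * 10 ^ k) (prev + 1)), st.2 + (k : Int))) (none, 0)).2

-- ===== PRECONDITION & SPEC =====
-- Pre_solve excludes exactly the inputs on which A's inner search loop never terminates
-- (an element ≤ 0 at a position ≥ 1 whose preceding prefix is not strictly increasing):
-- A returns no value there, so nothing is claimed about them.
def Pre_solve (nums : List Int) : Prop :=
  ∀ i, i < nums.length → 1 ≤ nums.getD i 0 ∨ i = 0 ∨
    ∀ j, j < i → nums.getD j 0 < nums.getD (j + 1) 0

instance (nums : List Int) : Decidable (Pre_solve nums) := by unfold Pre_solve; infer_instance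

def pvWitness_solve : List Int := ([1, 5, 2])

def Spec_solve (nums : List Int) (out : Int) : Prop := out = solve_alt nums
instance (nums : List Int) (out : Int) : Decidable (Spec_solve nums out) := by unfold Spec_solve; infer_instance

-- ===== CLAIM (what is proved, stated in full; the proofs are below) =====
def Claim_equal_solve : Prop := ∀ (nums : List Int), Dom_solve nums → Pre_solve nums → Spec_solve nums (solve nums)

-- ===== LEMMAS AND PROOFS =====

lemma digitChar_ne_dash {d : Nat} (hd : d < 10) : Nat.digitChar d ≠ '-' := by
  interval_cases d <;> decide

lemma digitChar_inj {d e : Nat} (hd : d < 10) (he : e < 10)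
    (h : Nat.digitChar d = Nat.digitChar e) : d = e := by
  interval_cases d <;> interval_cases e <;> first | rfl | exact absurd h (by decide)

lemma toDigitsCore_eq : ∀ (f n : Nat) (l : List Char), n < f →
    Nat.toDigitsCore 10 f n l =
      (if n = 0 then ['0'] else ((Nat.digits 10 n).map Nat.digitChar).reverse) ++ l := by
  intro f
  induction f with
  | zero => omega
  | succ f ih =>
    intro n l h
    rw [Nat.toDigitsCore]
    by_cases h0 : n / 10 = 0
    · have hn10 : n < 10 := by omega
      simp only [h0, if_true]
      by_cases hz : n = 0
      · subst hz; simp; rfl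
      · rw [if_neg hz, Nat.digits_of_lt 10 n hz hn10]
        simp [Nat.mod_eq_of_lt hn10]
    · have hn : n ≠ 0 := by omega
      have h10 : 10 ≤ n := by omega
      rw [if_neg h0, ih (n / 10) _ (by omega), if_neg h0, if_neg hn,
        Nat.digits_def' (by norm_num : (1:Nat) < 10) (by omega : 0 < n)]
      simp

lemma toDigits_eq (n : Nat) :
    Nat.toDigits 10 n = if n = 0 then ['0'] else ((Nat.digits 10 n).map Nat.digitChar).reverse := by
  rw [Nat.toDigits, toDigitsCore_eq (n + 1) n [] (by omega), List.append_nil]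

lemma toChars_pos {m : Int} (h : 1 ≤ m) :
    PySem.Int.toChars m = ((Nat.digits 10 m.toNat).map Nat.digitChar).reverse := by
  rw [PySem.Int.toChars, if_neg (by omega), toDigits_eq, if_neg (by omega)]

lemma map_digitChar_suffix_iff {A B : List Nat} (hA : ∀ a ∈ A, a < 10) (hB : ∀ b ∈ B, b < 10) :
    A.map Nat.digitChar <:+ B.map Nat.digitChar ↔ A <:+ B := by
  constructor
  · intro h
    have hlen : A.length ≤ B.length := by
      have := h.length_le; simpa using this
    have hd := List.suffix_iff_eq_drop.mp h
    simp only [List.length_map] at hd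
    rw [← List.map_drop] at hd
    have : A = B.drop (B.length - A.length) := by
      clear h
      revert hd
      generalize hD : B.drop (B.length - A.length) = D
      intro hd
      have hD10 : ∀ d ∈ D, d < 10 := fun d hdm => hB d (by
        exact List.mem_of_mem_drop (hD ▸ hdm))
      clear hD hB hlen
      induction A generalizing D with
      | nil => cases D <;> simp_all
      | cons a A ih =>
        cases D with
        | nil => simp_all
        | cons d D =>
          simp only [List.map_cons, List.cons.injEq] at hd
          have := digitChar_inj (hA a (by simp)) (hD10 d (by simp)) hd.1
          subst this
          exact (List.cons.injEq _ _ _ _).mpr ⟨rfl, ih (fun x hx => hA x (by simp [hx])) D hd.2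
            (fun x hx => hD10 x (by simp [hx]))⟩
    rw [List.suffix_iff_eq_drop]
    exact this
  · exact fun h => h.map _

lemma digits_suffix_iff {a n : Nat} (ha : 1 ≤ a) (hn : 1 ≤ n) :
    Nat.digits 10 a <:+ Nat.digits 10 n ↔ ∃ k, a * 10 ^ k ≤ n ∧ n < (a + 1) * 10 ^ k := by
  constructor
  · rintro ⟨l, hl⟩
    refine ⟨l.length, ?_, ?_⟩
    · have := Nat.ofDigits_digits 10 n
      rw [← hl, Nat.ofDigits_append, Nat.ofDigits_digits] at this
      have hcm : 10 ^ l.length * a = a * 10 ^ l.length := Nat.mul_comm _ _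
      omega
    · have := Nat.ofDigits_digits 10 n
      rw [← hl, Nat.ofDigits_append, Nat.ofDigits_digits] at this
      have hlt : Nat.ofDigits 10 l < 10 ^ l.length := by
        apply Nat.ofDigits_lt_base_pow_length (by norm_num)
        intro x hx
        exact Nat.digits_lt_base (by norm_num) (hl ▸ List.mem_append_left _ hx)
      calc n = Nat.ofDigits 10 l + 10 ^ l.length * a := this.symm
        _ < 10 ^ l.length + 10 ^ l.length * a := by omega
        _ = (a + 1) * 10 ^ l.length := by ring
  · rintro ⟨k, h1, h2⟩
    set r := n - a * 10 ^ k with hr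
    have hrk : r < 10 ^ k := by
      have : (a + 1) * 10 ^ k = a * 10 ^ k + 10 ^ k := by ring
      omega
    have hL : (Nat.digits 10 r).length ≤ k := (Nat.digits_length_le_iff (by norm_num) r).mpr hrk
    have := Nat.digits_append_zeroes_append_digits (b := 10) (k := k - (Nat.digits 10 r).length)
      (m := a) (n := r) (by norm_num) (by omega)
    rw [show (Nat.digits 10 r).length + (k - (Nat.digits 10 r).length) = k from by omega] at this
    have hn' : r + 10 ^ k * a = n := by
      have hcm : 10 ^ k * a = a * 10 ^ k := Nat.mul_comm _ _
      omega
    rw [hn'] at this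
    exact ⟨_, by rw [← this, List.append_assoc]⟩

lemma digits_length_of_between {a n k : Nat} (ha : 1 ≤ a)
    (h1 : a * 10 ^ k ≤ n) (h2 : n < (a + 1) * 10 ^ k) :
    (Nat.digits 10 n).length = (Nat.digits 10 a).length + k := by
  set La := (Nat.digits 10 a).length with hLa
  have ha' : a < 10 ^ La := by
    have := (Nat.digits_length_le_iff (by norm_num : (1:Nat) < 10) a).mp (le_refl La)
    exact this
  have hpos0 : 0 < La := by
    rcases Nat.eq_zero_or_pos La with h0 | h0
    · exfalso
      have hle : (Nat.digits 10 a).length ≤ 0 := by omega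
      have := (Nat.digits_length_le_iff (by norm_num : (1:Nat) < 10) a).mp hle
      simp at this; omega
    · exact h0
  have hla : 10 ^ (La - 1) ≤ a := by
    have := (Nat.lt_digits_length_iff (by norm_num : (1:Nat) < 10) a).mp (by omega : La - 1 < La)
    exact this
  have hub : n < 10 ^ (La + k) := by
    calc n < (a + 1) * 10 ^ k := h2
      _ ≤ 10 ^ La * 10 ^ k := by
          have : a + 1 ≤ 10 ^ La := by omega
          exact Nat.mul_le_mul_right _ this
      _ = 10 ^ (La + k) := by rw [pow_add]
  have hlb : 10 ^ (La - 1 + k) ≤ n := by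
    calc 10 ^ (La - 1 + k) = 10 ^ (La - 1) * 10 ^ k := by rw [pow_add]
      _ ≤ a * 10 ^ k := Nat.mul_le_mul_right _ hla
      _ ≤ n := h1
  have hu := (Nat.digits_length_le_iff (by norm_num : (1:Nat) < 10) n).mpr hub
  have hl := (Nat.lt_digits_length_iff (by norm_num : (1:Nat) < 10) n).mpr hlb
  have hpos : 0 < La := by
    rcases Nat.eq_zero_or_pos La with h0 | h0
    · exfalso
      have hle : (Nat.digits 10 a).length ≤ 0 := by omega
      have := (Nat.digits_length_le_iff (by norm_num : (1:Nat) < 10) a).mp hle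
      simp at this; omega
    · exact h0
  omega

lemma toChars_zero : PySem.Int.toChars 0 = ['0'] := by decide

lemma one_le_mul10 {num : Int} {k : Nat} (h : 1 ≤ num) : (1 : Int) ≤ num * 10 ^ k := by
  have h1 : (0 : Int) < 10 ^ k := pow_pos (by norm_num) k
  nlinarith

lemma startswith_toChars_iff {num m : Int} (h : 1 ≤ num) :
    PySem.Chars.startswith (PySem.Int.toChars m) (PySem.Int.toChars num) = true
      ↔ ∃ k : Nat, num * 10 ^ k ≤ m ∧ m < (num + 1) * 10 ^ k := by
  have hnum0 : num.toNat ≠ 0 := by omega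
  have hchars : PySem.Int.toChars num = ((Nat.digits 10 num.toNat).map Nat.digitChar).reverse :=
    toChars_pos h
  have hne : PySem.Int.toChars num ≠ [] := by
    rw [hchars]
    simp [Nat.digits_ne_nil_iff_ne_zero, hnum0]
  have hdignum : ∀ d ∈ Nat.digits 10 num.toNat, d < 10 :=
    fun d hd => Nat.digits_lt_base (by norm_num) hd
  rw [PySem.Chars.startswith_iff]
  rcases lt_trichotomy m 0 with hm | hm | hm
  · constructor
    · rintro ⟨t, ht⟩
      exfalso
      have hmchars : PySem.Int.toChars m = '-' :: Nat.toDigits 10 m.natAbs := by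
        rw [PySem.Int.toChars, if_pos hm]
      rw [hmchars] at ht
      rcases hp : PySem.Int.toChars num with _ | ⟨c, cs⟩
      · exact hne hp
      · rw [hp] at ht
        simp only [List.cons_append, List.cons.injEq] at ht
        have hcmem : c ∈ PySem.Int.toChars num := by rw [hp]; simp
        rw [hchars] at hcmem
        simp only [List.mem_reverse, List.mem_map] at hcmem
        obtain ⟨d, hd, hdc⟩ := hcmem
        exact digitChar_ne_dash (hdignum d hd) (hdc.trans ht.1)
    · rintro ⟨k, hk1, hk2⟩
      exfalso
      have : (1 : Int) ≤ num * 10 ^ k := one_le_mul10 h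
      omega
  · subst hm
    rw [toChars_zero]
    constructor
    · rintro ⟨t, ht⟩
      exfalso
      rcases hp : PySem.Int.toChars num with _ | ⟨c, cs⟩
      · exact hne hp
      · rw [hp] at ht
        simp only [List.cons_append, List.cons.injEq] at ht
        have hcs : cs = [] := (List.append_eq_nil_iff.mp ht.2).1
        have hsing : PySem.Int.toChars num = ['0'] := by rw [hp, hcs, ht.1]
        rw [hchars] at hsing
        have hmap : (Nat.digits 10 num.toNat).map Nat.digitChar = ['0'] := by
          have := congrArg List.reverse hsing
          simpa using this
        rcases hdig : Nat.digits 10 num.toNat with _ | ⟨d, ds⟩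
        · rw [hdig] at hmap; simp at hmap
        · rw [hdig] at hmap
          simp only [List.map_cons, List.cons.injEq, List.map_eq_nil_iff] at hmap
          have hd0 : d = 0 := by
            have : Nat.digitChar d = Nat.digitChar 0 := hmap.1
            exact digitChar_inj (hdignum d (by rw [hdig]; simp)) (by norm_num) this
          have := Nat.ofDigits_digits 10 num.toNat
          rw [hdig, hmap.2, hd0] at this
          simp [Nat.ofDigits] at this
          omega
    · rintro ⟨k, hk1, hk2⟩
      exfalso
      have : (1 : Int) ≤ num * 10 ^ k := one_le_mul10 h
      omega
  · have hmchars : PySem.Int.toChars m = ((Nat.digits 10 m.toNat).map Nat.digitChar).reverse :=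
      toChars_pos (by omega)
    rw [hchars, hmchars, List.reverse_prefix,
      map_digitChar_suffix_iff hdignum (fun d hd => Nat.digits_lt_base (by norm_num) hd),
      digits_suffix_iff (by omega) (by omega)]
    have hm' : ((m.toNat : Int)) = m := Int.toNat_of_nonneg (by omega)
    have hn' : ((num.toNat : Int)) = num := Int.toNat_of_nonneg (by omega)
    constructor
    · rintro ⟨k, hk1, hk2⟩
      refine ⟨k, ?_, ?_⟩
      · rw [← hm', ← hn']; exact_mod_cast hk1
      · rw [← hm', ← hn']; exact_mod_cast hk2
    · rintro ⟨k, hk1, hk2⟩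
      refine ⟨k, ?_, ?_⟩
      · rw [← hm', ← hn'] at hk1; exact_mod_cast hk1
      · rw [← hm', ← hn'] at hk2; exact_mod_cast hk2

lemma lenC_of_between {num m : Int} {k : Nat} (h : 1 ≤ num)
    (h1 : num * 10 ^ k ≤ m) (h2 : m < (num + 1) * 10 ^ k) :
    ((PySem.Int.toChars m).length : Int) = ((PySem.Int.toChars num).length : Int) + k := by
  have hm : 1 ≤ m := by
    have : (1 : Int) ≤ num * 10 ^ k := one_le_mul10 h
    omega
  rw [toChars_pos h, toChars_pos hm]
  simp only [List.length_reverse, List.length_map]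
  have hm' : ((m.toNat : Int)) = m := Int.toNat_of_nonneg (by omega)
  have hn' : ((num.toNat : Int)) = num := Int.toNat_of_nonneg (by omega)
  have := digits_length_of_between (a := num.toNat) (n := m.toNat) (k := k) (by omega)
    (by rw [← hm', ← hn'] at h1; exact_mod_cast h1)
    (by rw [← hm', ← hn'] at h2; exact_mod_cast h2)
  omega

def lenC (m : Int) : Int := ((PySem.Int.toChars m).length : Int)

lemma strStarts (a b : Int) :
    PySem.Str.startswith (PySem.Int.toStr a) (PySem.Int.toStr b)
      = PySem.Chars.startswith (PySem.Int.toChars a) (PySem.Int.toChars b) := by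
  rw [PySem.Str.startswith_eq, PySem.Int.toList_toStr, PySem.Int.toList_toStr]

lemma ten_pow_big (e : Nat) : (e : Int) < 10 ^ e := by
  have := Nat.lt_pow_self (by norm_num : 1 < 10) (n := e)
  exact_mod_cast this

lemma findK_go {num prev : Int} :
    ∀ (fuel k : Nat), ¬ ((num + 1) * 10 ^ (k + fuel) - 1 ≤ prev) →
      k ≤ findK num prev k fuel ∧
      ¬ ((num + 1) * 10 ^ (findK num prev k fuel) - 1 ≤ prev) ∧
      ∀ j, k ≤ j → j < findK num prev k fuel → (num + 1) * 10 ^ j - 1 ≤ prev := by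
  intro fuel
  induction fuel with
  | zero =>
    intro k h
    rw [findK]
    exact ⟨le_refl _, by simpa using h, fun j h1 h2 => absurd h2 (by omega)⟩
  | succ fuel ih =>
    intro k h
    rw [findK]
    by_cases hg : (num + 1) * 10 ^ k - 1 ≤ prev
    · rw [if_pos hg]
      obtain ⟨h1, h2, h3⟩ := ih (k + 1) (by
        rw [show k + 1 + fuel = k + (fuel + 1) from by omega]; exact h)
      refine ⟨by omega, h2, fun j hj1 hj2 => ?_⟩
      rcases Nat.eq_or_lt_of_le hj1 with rfl | hlt
      · exact hg
      · exact h3 j (by omega) hj2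
    · rw [if_neg hg]
      exact ⟨le_refl _, hg, fun j h1 h2 => absurd h2 (by omega)⟩

lemma findK_spec {num prev : Int} (hnum : 1 ≤ num) :
    1 ≤ findK num prev 1 (prev.natAbs + 2) ∧
    ¬ ((num + 1) * 10 ^ (findK num prev 1 (prev.natAbs + 2)) - 1 ≤ prev) ∧
    ∀ j, 1 ≤ j → j < findK num prev 1 (prev.natAbs + 2) → (num + 1) * 10 ^ j - 1 ≤ prev := by
  apply findK_go
  intro hcon
  set e := 1 + (prev.natAbs + 2) with he
  have hbig : (e : Int) < 10 ^ e := ten_pow_big e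
  have hpa : prev ≤ (prev.natAbs : Int) := Int.le_natAbs
  have hpow : (0 : Int) < 10 ^ e := pow_pos (by norm_num) e
  have h2 : 2 * 10 ^ e ≤ (num + 1) * 10 ^ e := by nlinarith
  have hee : ((e : Int)) = (prev.natAbs : Int) + 3 := by push_cast [he]; ring
  omega

lemma findOffset_eq (prev num start m0 : Int)
    (hP : prev < m0 ∧ PySem.Chars.startswith (PySem.Int.toChars m0) (PySem.Int.toChars num) = true)
    (hmin : ∀ x, start ≤ x → x < m0 →
      ¬ (prev < x ∧ PySem.Chars.startswith (PySem.Int.toChars x) (PySem.Int.toChars num) = true)) :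
    ∀ (fuel : Nat) (offset : Int), 0 ≤ offset → start + offset ≤ m0 → m0 ≤ start + offset + fuel →
      findOffset prev (PySem.Int.toStr num) start fuel offset = m0 - start := by
  intro fuel
  induction fuel with
  | zero =>
    intro offset h0 h1 h2
    rw [findOffset]
    simp only [Nat.cast_zero, add_zero] at h2
    omega
  | succ fuel ih =>
    intro offset h0 h1 h2
    rw [findOffset]
    by_cases hx : start + offset = m0
    · rw [if_pos (by rw [hx, strStarts]; exact ⟨hP.1, hP.2⟩)]
      omega
    · have hlt : start + offset < m0 := by omega
      rw [if_neg (by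
        rw [strStarts]
        intro hcon
        exact hmin (start + offset) (by omega) hlt ⟨hcon.1, hcon.2⟩)]
      rw [ih (offset + 1) (by omega) (by omega) (by push_cast at h2 ⊢; omega)]

def nextVal (prev num : Int) : Int :=
  if prev < num then num
  else max (num * 10 ^ findK num prev 1 (prev.natAbs + 2)) (prev + 1)

lemma nextVal_gt {prev num : Int} (h : 1 ≤ num ∨ prev < num) : prev < nextVal prev num := by
  rw [nextVal]
  split
  · assumption
  · have := le_max_right (num * 10 ^ findK num prev 1 (prev.natAbs + 2)) (prev + 1)
    omega

lemma nextVal_startswith {prev num : Int} (h : 1 ≤ num ∨ prev < num) :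
    PySem.Chars.startswith (PySem.Int.toChars (nextVal prev num)) (PySem.Int.toChars num) = true := by
  rw [nextVal]
  split
  · exact (PySem.Chars.startswith_iff _ _).mpr (List.prefix_refl _)
  · rename_i hnp
    have hnum : 1 ≤ num := by rcases h with h | h; exact h; exact absurd h hnp
    obtain ⟨hk1, hk2, hk3⟩ := findK_spec (prev := prev) hnum
    set k0 := findK num prev 1 (prev.natAbs + 2) with hk0
    have hpow : (0 : Int) < 10 ^ k0 := pow_pos (by norm_num) k0
    have hu1 : num * 10 ^ k0 < (num + 1) * 10 ^ k0 := by nlinarith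
    have hu2 : prev + 1 < (num + 1) * 10 ^ k0 := by omega
    exact (startswith_toChars_iff hnum).mpr ⟨k0, le_max_left _ _, max_lt hu1 hu2⟩


lemma nextVal_min {prev num : Int} (h : 1 ≤ num ∨ prev < num) :
    ∀ x, max num prev ≤ x → x < nextVal prev num →
      ¬ (prev < x ∧ PySem.Chars.startswith (PySem.Int.toChars x) (PySem.Int.toChars num) = true) := by
  intro x hx1 hx2 ⟨hxp, hsw⟩
  rw [nextVal] at hx2
  by_cases hnp : prev < num
  · rw [if_pos hnp] at hx2
    have : num ≤ x := le_trans (le_max_left _ _) hx1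
    omega
  · rw [if_neg hnp] at hx2
    have hnum : 1 ≤ num := by rcases h with h | h; exact h; exact absurd h hnp
    obtain ⟨hk1, hk2, hk3⟩ := findK_spec (prev := prev) hnum
    set k0 := findK num prev 1 (prev.natAbs + 2) with hk0
    obtain ⟨j, hj1, hj2⟩ := (startswith_toChars_iff hnum).mp hsw
    rcases Nat.lt_or_ge j 1 with hj | hj
    · have hj0 : j = 0 := by omega
      subst hj0
      simp only [pow_zero, mul_one] at hj2
      omega
    · rcases Nat.lt_or_ge j k0 with hjk | hjk
      · have := hk3 j hj hjk
        omega
      · have hmono : num * 10 ^ k0 ≤ num * 10 ^ j := by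
          apply mul_le_mul_of_nonneg_left _ (by omega)
          exact pow_le_pow_right₀ (by norm_num) hjk
        have : max (num * 10 ^ k0) (prev + 1) ≤ x := max_le (by omega) (by omega)
        omega

lemma stepA_eq {prev num : Int} (h : 1 ≤ num ∨ prev < num) :
    max num prev + findOffset prev (PySem.Int.toStr num) (max num prev)
      (10 * (max num prev).natAbs + 11) 0 = nextVal prev num := by
  have hbound : max num prev ≤ nextVal prev num ∧
      nextVal prev num ≤ max num prev + (10 * (max num prev).natAbs + 11 : Nat) := by
    rw [nextVal]
    by_cases hnp : prev < num
    · rw [if_pos hnp, max_eq_left (by omega : prev ≤ num)]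
      constructor
      · omega
      · have : (0 : Int) ≤ (10 * num.natAbs + 11 : Nat) := by positivity
        omega
    · rw [if_neg hnp]
      have hnum : 1 ≤ num := by rcases h with h | h; exact h; exact absurd h hnp
      have hmax : max num prev = prev := max_eq_right (by omega)
      rw [hmax]
      obtain ⟨hk1, hk2, hk3⟩ := findK_spec (prev := prev) hnum
      set k0 := findK num prev 1 (prev.natAbs + 2) with hk0
      have hub : num * 10 ^ k0 ≤ 10 * prev + 10 := by
        rcases Nat.eq_or_lt_of_le hk1 with h1 | h1
        · rw [← h1, pow_one]
          nlinarith
        · have := hk3 (k0 - 1) (by omega) (by omega)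
          have hsplit : (10 : Int) ^ k0 = 10 ^ (k0 - 1) * 10 := by
            rw [← pow_succ]
            congr 1
            omega
          have hpow : (0 : Int) < 10 ^ (k0 - 1) := pow_pos (by norm_num) _
          nlinarith
      have hprevpos : 0 ≤ prev := by omega
      have hpa : ((prev.natAbs : Int)) = prev := Int.natAbs_of_nonneg hprevpos
      constructor
      · have := le_max_right (num * 10 ^ k0) (prev + 1)
        omega
      · have hm : max (num * 10 ^ k0) (prev + 1) ≤ 10 * prev + 10 := max_le hub (by omega)
        have hcast : ((10 * prev.natAbs + 11 : Nat) : Int) = 10 * (prev.natAbs : Int) + 11 := by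
          push_cast; ring
        omega
  have := findOffset_eq prev num (max num prev) (nextVal prev num)
    ⟨nextVal_gt h, nextVal_startswith h⟩ (nextVal_min h)
    (10 * (max num prev).natAbs + 11) 0 (le_refl 0) (by omega) (by
      have := hbound.2
      omega)
  omega

lemma lenC_nextVal {prev num : Int} (h : 1 ≤ num ∨ prev < num) :
    lenC (nextVal prev num) - lenC num =
      if prev < num then 0 else (findK num prev 1 (prev.natAbs + 2) : Int) := by
  by_cases hnp : prev < num
  · rw [if_pos hnp, nextVal, if_pos hnp]
    omega
  · rw [if_neg hnp, nextVal, if_neg hnp]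
    have hnum : 1 ≤ num := by rcases h with h | h; exact h; exact absurd h hnp
    obtain ⟨hk1, hk2, hk3⟩ := findK_spec (prev := prev) hnum
    set k0 := findK num prev 1 (prev.natAbs + 2) with hk0
    have hpow : (0 : Int) < 10 ^ k0 := pow_pos (by norm_num) k0
    have hu1 : num * 10 ^ k0 < (num + 1) * 10 ^ k0 := by nlinarith
    have hu2 : prev + 1 < (num + 1) * 10 ^ k0 := by omega
    have hlen := lenC_of_between (k := k0) hnum (le_max_left _ _) (max_lt hu1 hu2)
    simp only [lenC]
    omega

def goMod (prev : Int) : List Int → List Int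
  | [] => []
  | x :: xs => nextVal prev x :: goMod (nextVal prev x) xs

def OkChain (prev : Int) : List Int → Prop
  | [] => True
  | x :: xs => (1 ≤ x ∨ prev < x) ∧ OkChain (nextVal prev x) xs

def totOf (prev : Int) : List Int → Int
  | [] => 0
  | x :: xs => (lenC (nextVal prev x) - lenC x) + totOf (nextVal prev x) xs

def lastM (prev : Int) : List Int → Int
  | [] => prev
  | x :: xs => lastM (nextVal prev x) xs

lemma getD_concat (l : List Int) (x : Int) : (l ++ [x]).getD l.length 0 = x := by
  rw [List.getD_append_right l [x] 0 l.length (le_refl _)]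
  simp

lemma okAux : ∀ (xs pfx : List Int) (x prev : Int),
    Pre_solve (pfx ++ x :: xs) →
    ((∀ j, j + 1 < pfx.length + 1 →
        (pfx ++ [x]).getD j 0 < (pfx ++ [x]).getD (j + 1) 0) → prev = x) →
    OkChain prev xs := by
  intro xs
  induction xs with
  | nil => intro _ _ _ _ _; trivial
  | cons y ys ih =>
    intro pfx x prev hpre hinv
    have hL : pfx ++ x :: y :: ys = (pfx ++ [x]) ++ y :: ys := by simp
    have hLlen : (pfx ++ x :: y :: ys).length = pfx.length + 2 + ys.length := by
      simp; omega
    have hgx : (pfx ++ x :: y :: ys).getD pfx.length 0 = x := by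
      rw [List.getD_append_right pfx _ 0 pfx.length (le_refl _)]
      simp
    have hgy : (pfx ++ x :: y :: ys).getD (pfx.length + 1) 0 = y := by
      rw [List.getD_append_right pfx _ 0 (pfx.length + 1) (by omega)]
      simp
    have hfst : 1 ≤ y ∨ prev < y := by
      by_cases hy : 1 ≤ y
      · exact Or.inl hy
      · right
        rcases hpre (pfx.length + 1) (by omega) with h | h | h
        · rw [hgy] at h; omega
        · omega
        · have hprevx : prev = x := by
            apply hinv
            intro j hj
            have h1 := h j (by omega)
            rw [hL, List.getD_append _ _ _ j (by simp; omega),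
              List.getD_append _ _ _ (j + 1) (by simp; omega)] at h1
            exact h1
          have hxy : x < y := by
            have h2 := h pfx.length (by omega)
            rw [hgx, hgy] at h2
            exact h2
          omega
    refine ⟨hfst, ?_⟩
    apply ih (pfx ++ [x]) y (nextVal prev y)
    · simpa using hpre
    · intro hch
      have hprevx : prev = x := by
        apply hinv
        intro j hj
        have h1 := hch j (by simp; omega)
        rw [List.getD_append _ _ _ j (by simp; omega),
          List.getD_append _ _ _ (j + 1) (by simp; omega)] at h1
        exact h1
      have hxy : x < y := by
        have h2 := hch pfx.length (by simp)
        rw [List.getD_append _ _ _ pfx.length (by simp)] at h2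
        rw [show pfx.length + 1 = (pfx ++ [x]).length from by simp] at h2
        rw [getD_concat pfx x, getD_concat (pfx ++ [x]) y] at h2
        exact h2
      rw [nextVal, if_pos (by omega : prev < y)]

lemma ok_of_pre {x : Int} {xs : List Int} (h : Pre_solve (x :: xs)) : OkChain x xs :=
  okAux xs [] x x (by simpa using h) (fun _ => rfl)

lemma foldB_eq : ∀ (xs : List Int) (prev acc : Int), OkChain prev xs →
    xs.foldl (fun (st : Option Int × Int) num =>
      match st.1 with
      | none => (some num, st.2)
      | some prev =>
        if num > prev then (some num, st.2)
        else
          let k := findK num prev 1 (prev.natAbs + 2)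
          (some (max (num * 10 ^ k) (prev + 1)), st.2 + (k : Int))) (some prev, acc)
      = (some (lastM prev xs), acc + totOf prev xs) := by
  intro xs
  induction xs with
  | nil => intro prev acc _; simp [lastM, totOf]
  | cons x xs ih =>
    intro prev acc hok
    obtain ⟨h1, h2⟩ := hok
    rw [List.foldl_cons]
    by_cases hgt : x > prev
    · have hnv : nextVal prev x = x := by rw [nextVal, if_pos hgt]
      have hlen : lenC (nextVal prev x) - lenC x = 0 := by
        rw [hnv]; omega
      simp only [if_pos hgt]
      rw [ih x acc (by rw [← hnv]; exact h2)]
      rw [lastM, totOf, hnv]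
      simp only [Prod.mk.injEq]
      exact ⟨trivial, by omega⟩
    · have hnv : nextVal prev x = max (x * 10 ^ findK x prev 1 (prev.natAbs + 2)) (prev + 1) := by
        rw [nextVal, if_neg hgt]
      have hlen : lenC (nextVal prev x) - lenC x = (findK x prev 1 (prev.natAbs + 2) : Int) := by
        rw [lenC_nextVal h1, if_neg hgt]
      simp only [if_neg hgt]
      rw [hnv] at hlen
      rw [ih _ (acc + (findK x prev 1 (prev.natAbs + 2) : Int)) (by rw [← hnv]; exact h2)]
      rw [lastM, totOf, hnv, hlen]
      simp only [Prod.mk.injEq]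
      exact ⟨trivial, by ring⟩
lemma pyRange_nil {a b : Int} (h : b ≤ a) : PySem.List.pyRange a b = [] := by
  have hn : ¬ (a < b) := not_lt.mpr h
  simp [PySem.List.pyRange, hn]

lemma foldA_eq (nums : List Int) :
    ∀ (k i : Nat) (md : List Int), nums.length ≤ i + k → 1 ≤ i → i ≤ nums.length →
      md.length = nums.length →
      OkChain (md.getD (i - 1) 0) (nums.drop i) →
      (PySem.List.pyRange (i : Int) (nums.length : Int)).foldl (fun md i =>
          let strNum := PySem.Int.toStr (PySem.List.pyGetD nums i 0)
          let start := max (PySem.List.pyGetD nums i 0) (PySem.List.pyGetD md (i - 1) 0)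
          let offset := findOffset (PySem.List.pyGetD md (i - 1) 0) strNum start
            (10 * start.natAbs + 11) 0
          md.set i.toNat (start + offset)) md
        = md.take i ++ goMod (md.getD (i - 1) 0) (nums.drop i) := by
  intro k
  induction k with
  | zero =>
    intro i md hk h1 h2 hlen hok
    have hieq : i = nums.length := by omega
    subst hieq
    rw [pyRange_nil (le_refl _), List.foldl_nil, List.drop_length, goMod,
      List.append_nil, ← hlen, List.take_length]
  | succ k ih =>
    intro i md hk h1 h2 hlen hok
    rcases Nat.eq_or_lt_of_le h2 with hieq | hilt
    · subst hieq
      rw [pyRange_nil (le_refl _), List.foldl_nil, List.drop_length, goMod,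
        List.append_nil, ← hlen, List.take_length]
    · rw [PySem.List.pyRange_one_cons (by exact_mod_cast hilt), List.foldl_cons]
      have hidrop : nums.drop i = nums.getD i 0 :: nums.drop (i + 1) := by
        rw [List.drop_eq_getElem_cons hilt, List.getD_eq_getElem _ _ hilt]
      set x := nums.getD i 0 with hx
      set prev := md.getD (i - 1) 0 with hprev
      rw [hidrop] at hok
      obtain ⟨hcond, hok'⟩ := hok
      have hgn : PySem.List.pyGetD nums (i : Int) 0 = x := PySem.List.pyGetD_natCast nums i 0
      have hgm : PySem.List.pyGetD md ((i : Int) - 1) 0 = prev := by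
        rw [show ((i : Int) - 1) = ((i - 1 : Nat) : Int) from by omega]
        exact PySem.List.pyGetD_natCast md (i - 1) 0
      have hstep : (let strNum := PySem.Int.toStr (PySem.List.pyGetD nums (i : Int) 0)
          let start := max (PySem.List.pyGetD nums (i : Int) 0)
            (PySem.List.pyGetD md ((i : Int) - 1) 0)
          let offset := findOffset (PySem.List.pyGetD md ((i : Int) - 1) 0) strNum start
            (10 * start.natAbs + 11) 0
          md.set (i : Int).toNat (start + offset)) = md.set i (nextVal prev x) := by
        simp only [hgn, hgm, Int.toNat_natCast]
        rw [stepA_eq hcond]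
      rw [hstep]
      set md' := md.set i (nextVal prev x) with hmd'
      have hlen' : md'.length = nums.length := by rw [hmd', List.length_set, hlen]
      have hget' : md'.getD ((i + 1) - 1) 0 = nextVal prev x := by
        rw [hmd']
        rw [List.getD_eq_getElem _ _ (by rw [List.length_set, hlen]; omega)]
        simp [List.getElem_set_self]
      have := ih (i + 1) md' (by omega) (by omega) (by omega) hlen' (by
        rw [hget']; exact hok')
      rw [Nat.cast_add, Nat.cast_one] at this
      rw [this, hget']
      have htake : md'.take (i + 1) = md.take i ++ [nextVal prev x] := by
        rw [List.take_succ]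
        congr 1
        · rw [hmd', List.take_set]
          apply List.set_eq_of_length_le
          simp [hlen]
        · have hi' : i < md'.length := by rw [hlen']; omega
          have hv : md'[i] = nextVal prev x := by simp [hmd']
          rw [List.getElem?_eq_getElem hi', hv]
          rfl
      rw [htake, hidrop, goMod, List.append_assoc]
      rfl

lemma goMod_length : ∀ (xs : List Int) (prev : Int), (goMod prev xs).length = xs.length := by
  intro xs
  induction xs with
  | nil => intro prev; rfl
  | cons x xs ih => intro prev; rw [goMod]; simp [ih]

lemma sum_range_zip (g : Int → Int → Int) :
    ∀ (v u : List Int), u.length = v.length →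
      ((List.range v.length).map (fun k => g (u.getD k 0) (v.getD k 0))).sum
        = (List.zipWith g u v).sum := by
  intro v
  induction v with
  | nil => intro u h; simp
  | cons b v ih =>
    intro u h
    cases u with
    | nil => simp at h
    | cons a u =>
      simp only [List.length_cons, List.range_succ_eq_map, List.map_cons, List.map_map,
        List.zipWith_cons_cons, List.sum_cons, List.getD_cons_zero]
      rw [show ((fun k => g ((a :: u).getD k 0) ((b :: v).getD k 0)) ∘ Nat.succ)
          = fun k => g (u.getD k 0) (v.getD k 0) from by funext k; simp]
      rw [ih u (by simpa using h)]

lemma zip_tot : ∀ (xs : List Int) (prev : Int),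
    (List.zipWith (fun m x => lenC m - lenC x) (goMod prev xs) xs).sum = totOf prev xs := by
  intro xs
  induction xs with
  | nil => intro prev; simp [totOf]
  | cons x xs ih => intro prev; rw [goMod, totOf]; simp [ih]

lemma lenS_eq (m : Int) : PySem.Str.len (PySem.Int.toStr m) = lenC m := by
  rw [PySem.Str.len_eq, PySem.Int.toList_toStr]; rfl

theorem solve_eq_alt (nums : List Int) (hpre : Pre_solve nums) : solve nums = solve_alt nums := by
  cases nums with
  | nil => rfl
  | cons x xs =>
    have hok : OkChain x xs := ok_of_pre hpre
    have hslice : PySem.List.slice (x :: xs) none none = x :: xs := by simp [pysem]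
    have hfold := foldA_eq (x :: xs) (x :: xs).length 1 (x :: xs) (by omega) (by omega)
      (by simp) rfl (by simpa using hok)
    rw [Nat.cast_one] at hfold
    simp only [solve, solve_alt, hslice]
    rw [hfold]
    simp only [Nat.sub_self, List.take_succ_cons, List.take_zero, List.getD_cons_zero,
      List.drop_succ_cons, List.drop_zero, List.cons_append, List.nil_append]
    simp only [lenS_eq]
    rw [PySem.List.pyRange_zero_natCast, List.map_map]
    rw [show ((fun i => lenC (PySem.List.pyGetD (x :: goMod x xs) i 0)
        - lenC (PySem.List.pyGetD (x :: xs) i 0)) ∘ (fun k : Nat => (k : Int)))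
        = fun k : Nat => (fun m y => lenC m - lenC y) ((x :: goMod x xs).getD k 0)
            ((x :: xs).getD k 0) from by
      funext k
      simp [PySem.List.pyGetD_natCast]]
    rw [sum_range_zip (fun m y => lenC m - lenC y) (x :: xs) (x :: goMod x xs) (by simp [goMod_length])]
    simp only [List.zipWith_cons_cons, List.sum_cons, sub_self, zero_add]
    rw [zip_tot]
    rw [List.foldl_cons]
    rw [foldB_eq xs x 0 hok]
    simp

-- ===== VERDICT (by name: the statement is the Claim_ definition above) =====
theorem solve_spec : Claim_equal_solve := by
  intro nums _ hpre
  show solve nums = solve_alt nums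
  exact solve_eq_alt nums hpre
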